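-- pv_equiv track=rewrite | github.com/Arsen2406/Yolwise-Lead-Scoring-Addon | yolwise_scoring_api.py | _evaluate_industry_propensity
-- ===== SOURCE A (Python) =====
-- from typing import Dict, List, Any, Optional
--
-- def _evaluate_industry_propensity(data: Dict[str, Any]) -> float:
--     """Industry B2B Service Propensity (25% weight)"""
--     industry = str(data.get('Industry', '')).lower()
--
--     # High B2B Propensity (80-90 points)
--     high_propensity = ['renewables', 'environment', 'logistics', 'utilities']
--     if any(term in industry for term in high_propensity):
--         return 85
--
--     # Medium-High B2B Propensity (60-75 points)
--     medium_high = ['food', 'beverage', 'chemical', 'building materials']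
--     if any(term in industry for term in medium_high):
--         return 70
--
--     # Medium B2B Propensity (40-55 points)
--     medium = ['mechanical', 'industrial', 'engineering', 'mining', 'pharmaceutical']
--     if any(term in industry for term in medium):
--         return 50
--
--     # Low-Medium B2B Propensity (25-35 points)
--     low_medium = ['retail', 'construction', 'automotive']
--     if any(term in industry for term in low_medium):
--         return 30
--
--     # Low B2B Propensity (10-20 points)
--     low = ['software', 'computer', 'hospital', 'healthcare', 'transportation']
--     if any(term in industry for term in low):
--         return 15
--
--     return 30  # Unknown industry default
-- ===== SOURCE B (Python) =====
-- TIERS = [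
--     (['renewables', 'environment', 'logistics', 'utilities'], 85),
--     (['food', 'beverage', 'chemical', 'building materials'], 70),
--     (['mechanical', 'industrial', 'engineering', 'mining', 'pharmaceutical'], 50),
--     (['retail', 'construction', 'automotive'], 30),
--     (['software', 'computer', 'hospital', 'healthcare', 'transportation'], 15),
-- ]
--
-- def _evaluate_industry_propensity(data):
--     industry = str(data.get('Industry', '')).lower()
--     scores = [score for terms, score in TIERS
--               if any(term in industry for term in terms)]
--     return max(scores) if scores else 30
-- ===== Notes on version B (the rewrite author's own statement) =====
-- stated objective: simpler
-- what changed: Replaced the five-branch early-return chain by a data-driven tier table: collect the scores of all matching tiers in one comprehension and return their maximum (default 30); correct because tier scores are strictly descending in priority order.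
import Mathlib
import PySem

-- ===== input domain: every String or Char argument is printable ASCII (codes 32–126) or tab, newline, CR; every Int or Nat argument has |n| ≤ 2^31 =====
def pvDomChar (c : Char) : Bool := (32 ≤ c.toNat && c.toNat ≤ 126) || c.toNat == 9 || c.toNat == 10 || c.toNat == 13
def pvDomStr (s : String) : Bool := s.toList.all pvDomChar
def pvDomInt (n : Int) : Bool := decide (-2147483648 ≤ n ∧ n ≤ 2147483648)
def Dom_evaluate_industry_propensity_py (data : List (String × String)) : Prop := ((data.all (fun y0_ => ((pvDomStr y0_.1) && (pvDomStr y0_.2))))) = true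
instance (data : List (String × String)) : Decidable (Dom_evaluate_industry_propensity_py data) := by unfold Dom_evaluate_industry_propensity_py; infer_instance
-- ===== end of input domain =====

-- B replaces A's five-branch early-return chain by a tier table whose matching
-- scores are collected and maximised (objective: simpler); return values agree.

-- ===== PORT A =====
def evaluate_industry_propensity_py (data : List (String × String)) : Int :=
  let industry := PySem.Str.lower (PySem.Dict.getD (PySem.Dict.mk data) "Industry" "")
  let high_propensity := ["renewables", "environment", "logistics", "utilities"]
  if high_propensity.any (fun term => PySem.Str.isIn term industry) then 85
  else
    let medium_high := ["food", "beverage", "chemical", "building materials"]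
    if medium_high.any (fun term => PySem.Str.isIn term industry) then 70
    else
      let medium := ["mechanical", "industrial", "engineering", "mining", "pharmaceutical"]
      if medium.any (fun term => PySem.Str.isIn term industry) then 50
      else
        let low_medium := ["retail", "construction", "automotive"]
        if low_medium.any (fun term => PySem.Str.isIn term industry) then 30
        else
          let low := ["software", "computer", "hospital", "healthcare", "transportation"]
          if low.any (fun term => PySem.Str.isIn term industry) then 15
          else 30

-- ===== PORT B =====
def pvTiers : List (List String × Int) :=
  [ (["renewables", "environment", "logistics", "utilities"], 85),
    (["food", "beverage", "chemical", "building materials"], 70),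
    (["mechanical", "industrial", "engineering", "mining", "pharmaceutical"], 50),
    (["retail", "construction", "automotive"], 30),
    (["software", "computer", "hospital", "healthcare", "transportation"], 15) ]

def evaluate_industry_propensity_py_alt (data : List (String × String)) : Int :=
  let industry := PySem.Str.lower (PySem.Dict.getD (PySem.Dict.mk data) "Industry" "")
  let scores := (pvTiers.filter
      (fun tier => tier.1.any (fun term => PySem.Str.isIn term industry))).map Prod.snd
  match scores.max? with
  | some m => m
  | none => 30

-- ===== PRECONDITION & SPEC =====
def Spec_evaluate_industry_propensity_py (data : List (String × String)) (out : Int) : Prop := out = evaluate_industry_propensity_py_alt data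
instance (data : List (String × String)) (out : Int) : Decidable (Spec_evaluate_industry_propensity_py data out) := by unfold Spec_evaluate_industry_propensity_py; infer_instance

-- ===== CLAIM (what is proved, stated in full; the proofs are below) =====
def Claim_equal_evaluate_industry_propensity_py : Prop := ∀ (data : List (String × String)), Dom_evaluate_industry_propensity_py data → Spec_evaluate_industry_propensity_py data (evaluate_industry_propensity_py data)

-- ===== LEMMAS AND PROOFS =====

-- Core fact: an early-return chain over five descending scores equals the
-- maximum of the matched entries of the corresponding table (default 30).
lemma pv_chain_eq (p : List String × Int → Bool) (t1 t2 t3 t4 t5 : List String) :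
    (if p (t1, 85) then (85 : Int)
     else if p (t2, 70) then 70
     else if p (t3, 50) then 50
     else if p (t4, 30) then 30
     else if p (t5, 15) then 15
     else 30) =
    (match (([(t1, (85 : Int)), (t2, 70), (t3, 50), (t4, 30), (t5, 15)].filter p).map Prod.snd).max? with
     | some m => m
     | none => (30 : Int)) := by
  cases h1 : p (t1, 85) <;> cases h2 : p (t2, 70) <;> cases h3 : p (t3, 50) <;>
    cases h4 : p (t4, 30) <;> cases h5 : p (t5, 15) <;>
    simp [List.filter, h1, h2, h3, h4, h5, List.max?]

-- ===== VERDICT (by name: the statement is the Claim_ definition above) =====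
theorem evaluate_industry_propensity_py_spec : Claim_equal_evaluate_industry_propensity_py := by
  intro data _
  unfold Spec_evaluate_industry_propensity_py evaluate_industry_propensity_py evaluate_industry_propensity_py_alt pvTiers
  exact pv_chain_eq (fun tier => tier.1.any (fun term => PySem.Str.isIn term (PySem.Str.lower (PySem.Dict.getD (PySem.Dict.mk data) "Industry" "")))) _ _ _ _ _
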